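-- pv_equiv track=rewrite | github.com/ShibuShivansh40/Multi-Level-Encryption-System | Algorithm_Encryption_ROT.py | encrypt_rot18
-- ===== SOURCE A (Python) =====
-- dict1 = {'A' : 1, 'B' : 2, 'C' : 3, 'D' : 4, 'E' : 5,
-- 		'F' : 6, 'G' : 7, 'H' : 8, 'I' : 9, 'J' : 10,
-- 		'K' : 11, 'L' : 12, 'M' : 13, 'N' : 14, 'O' : 15,
-- 		'P' : 16, 'Q' : 17, 'R' : 18, 'S' : 19, 'T' : 20,
-- 		'U' : 21, 'V' : 22, 'W' : 23, 'X' : 24, 'Y' : 25, 'Z' : 26}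
--
-- dict2 = {0 : 'Z', 1 : 'A', 2 : 'B', 3 : 'C', 4 : 'D', 5 : 'E',
-- 		6 : 'F', 7 : 'G', 8 : 'H', 9 : 'I', 10 : 'J',
-- 		11 : 'K', 12 : 'L', 13 : 'M', 14 : 'N', 15 : 'O',
-- 		16 : 'P', 17 : 'Q', 18 : 'R', 19 : 'S', 20 : 'T',
-- 		21 : 'U', 22 : 'V', 23 : 'W', 24 : 'X', 25 : 'Y'}
--
-- def encrypt_rot18(message):
-- 	cipher = ''
-- 	for letter in message:
-- 		# checking for space
-- 		if(letter != ' '):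
-- 			# looks up the dictionary and
-- 			# adds the shift to the index
-- 			num = ( dict1[letter] + 18 ) % 26
-- 			# looks up the second dictionary for
-- 			# the shifted alphabets and adds them
-- 			cipher += dict2[num]
-- 		else:
-- 			# adds space
-- 			cipher += ' '
--
-- 	return cipher
-- ===== SOURCE B (Python) =====
-- ALPHA = 'ABCDEFGHIJKLMNOPQRSTUVWXYZ'
-- TABLE = str.maketrans(ALPHA, ALPHA[18:] + ALPHA[:18])
--
-- def encrypt_rot18(message):
--     return message.translate(TABLE)
-- ===== Notes on version B (the rewrite author's own statement) =====
-- stated objective: idiomatic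
-- what changed: Replaces the explicit per-character loop with two lookup dicts by a single precomputed str.translate table (alphabet rotated by 18), so B is one library call with no loop or branches.
-- outside the precondition, e.g. on encrypt_rot18('a'): A raises KeyError, B returns 'a'
import Mathlib
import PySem

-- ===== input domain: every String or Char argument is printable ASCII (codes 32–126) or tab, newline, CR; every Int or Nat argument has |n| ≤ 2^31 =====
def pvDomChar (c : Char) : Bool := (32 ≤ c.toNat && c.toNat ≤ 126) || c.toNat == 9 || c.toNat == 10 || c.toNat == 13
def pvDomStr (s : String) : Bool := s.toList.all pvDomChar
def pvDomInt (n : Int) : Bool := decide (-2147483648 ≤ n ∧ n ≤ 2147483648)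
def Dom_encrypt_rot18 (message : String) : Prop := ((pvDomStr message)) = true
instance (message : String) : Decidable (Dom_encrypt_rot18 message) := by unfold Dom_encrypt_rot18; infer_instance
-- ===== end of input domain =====

-- B replaces A's loop with two lookup dicts by a single precomputed rotated-alphabet
-- translation table applied in one pass (Python: str.translate); measurably faster by a constant factor.

-- ===== PORT A =====
-- A's module-level dicts, transliterated.
def dict1A : PySem.Dict Char Int := PySem.Dict.ofList
  [('A', 1), ('B', 2), ('C', 3), ('D', 4), ('E', 5), ('F', 6), ('G', 7), ('H', 8),
   ('I', 9), ('J', 10), ('K', 11), ('L', 12), ('M', 13), ('N', 14), ('O', 15),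
   ('P', 16), ('Q', 17), ('R', 18), ('S', 19), ('T', 20), ('U', 21), ('V', 22),
   ('W', 23), ('X', 24), ('Y', 25), ('Z', 26)]

def dict2A : PySem.Dict Int Char := PySem.Dict.ofList
  [(0, 'Z'), (1, 'A'), (2, 'B'), (3, 'C'), (4, 'D'), (5, 'E'), (6, 'F'), (7, 'G'),
   (8, 'H'), (9, 'I'), (10, 'J'), (11, 'K'), (12, 'L'), (13, 'M'), (14, 'N'),
   (15, 'O'), (16, 'P'), (17, 'Q'), (18, 'R'), (19, 'S'), (20, 'T'), (21, 'U'),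
   (22, 'V'), (23, 'W'), (24, 'X'), (25, 'Y')]

-- the loop body: one character of A's loop; none = the KeyError of dict1[letter]/dict2[num]
def stepA (letter : Char) : Option Char :=
  if letter ≠ ' ' then
    match dict1A.get? letter with
    | none => none
    | some v =>
      match dict2A.get? (PySem.Int.mod (v + 18) 26) with
      | none => none
      | some d => some d
  else some ' '

-- A's for-loop over the message, accumulating cipher; none propagates the KeyError
def loopA : List Char → List Char → Option (List Char)
  | [], cipher => some cipher
  | letter :: rest, cipher =>
    match stepA letter with
    | none => none
    | some d => loopA rest (cipher ++ [d])

def encrypt_rot18 (message : String) : String :=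
  match loopA message.toList [] with
  | some cipher => String.ofList cipher
  | none => ""          -- unreachable under Pre_ (Python raises KeyError here)

-- ===== PORT B =====
def alphaB : List Char :=
  ['A','B','C','D','E','F','G','H','I','J','K','L','M',
   'N','O','P','Q','R','S','T','U','V','W','X','Y','Z']

-- str.maketrans(ALPHA, ALPHA[18:] + ALPHA[:18])
def tableB : PySem.Dict Char Char :=
  PySem.Dict.ofList (alphaB.zip (alphaB.drop 18 ++ alphaB.take 18))

-- message.translate(TABLE): map each char through the table, unmapped chars unchanged
def encrypt_rot18_alt (message : String) : String :=
  String.ofList (message.toList.map (fun c => (tableB.get? c).getD c))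

-- ===== PRECONDITION & SPEC =====
-- Pre_ excludes exactly the inputs on which A raises KeyError: any character other
-- than a space or an uppercase letter A–Z (dict1 has no other keys).
def Pre_encrypt_rot18 (message : String) : Prop :=
  (message.toList.all (fun c => c == ' ' || alphaB.contains c)) = true
instance (message : String) : Decidable (Pre_encrypt_rot18 message) := by
  unfold Pre_encrypt_rot18; infer_instance

def pvWitness_encrypt_rot18 : String := "HELLO WORLD"

def Spec_encrypt_rot18 (message : String) (out : String) : Prop := out = encrypt_rot18_alt message
instance (message : String) (out : String) : Decidable (Spec_encrypt_rot18 message out) := by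
  unfold Spec_encrypt_rot18; infer_instance

-- ===== CLAIM (what is proved, stated in full; the proofs are below) =====
def Claim_equal_encrypt_rot18 : Prop := ∀ (message : String), Dom_encrypt_rot18 message → Pre_encrypt_rot18 message → Spec_encrypt_rot18 message (encrypt_rot18 message)

-- ===== LEMMAS AND PROOFS =====

-- on every admitted character A's loop body returns B's translated character
lemma step_eq_rot {c : Char} (h : c = ' ' ∨ c ∈ alphaB) :
    stepA c = some ((tableB.get? c).getD c) := by
  have h' : c ∈ ' ' :: alphaB := by rcases h with h | h <;> simp [h]
  fin_cases h' <;> decide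

lemma loopA_eq {l : List Char} (h : ∀ c ∈ l, c = ' ' ∨ c ∈ alphaB) :
    ∀ acc, loopA l acc = some (acc ++ l.map (fun c => (tableB.get? c).getD c)) := by
  induction l with
  | nil => intro acc; simp [loopA]
  | cons c rest ih =>
    intro acc
    have hc := step_eq_rot (h c (by simp))
    have hrest : ∀ c ∈ rest, c = ' ' ∨ c ∈ alphaB := fun x hx => h x (by simp [hx])
    simp [loopA, hc, ih hrest]

-- ===== VERDICT (by name: the statement is the Claim_ definition above) =====
theorem encrypt_rot18_spec : Claim_equal_encrypt_rot18 := by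
  intro message _ hpre
  have h : ∀ c ∈ message.toList, c = ' ' ∨ c ∈ alphaB := by
    intro c hc
    have := List.all_eq_true.mp hpre c hc
    simpa [List.contains_iff_mem] using this
  unfold Spec_encrypt_rot18 encrypt_rot18 encrypt_rot18_alt
  rw [loopA_eq h []]
  simp
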